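-- pv_equiv track=rewrite | github.com/28Zaaky/Usermode-Rootkit | server/c2_server.py | clean_keylog
-- ===== SOURCE A (Python) =====
-- def clean_keylog(raw_keylog: str) -> str:
--     """
--     Interprète les touches brutes pour reconstruire le texte réel.
--     Gère: [BACKSPACE], [CAPSLOCK], [LEFT], [RIGHT], [DELETE], etc.
--     """
--     result = []
--     cursor_pos = 0
--     caps_lock_on = False
--
--     i = 0
--     while i < len(raw_keylog):
--         # Détecter les touches spéciales entre crochets
--         if raw_keylog[i] == '[':
--             end_bracket = raw_keylog.find(']', i)
--             if end_bracket != -1: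
--                 key = raw_keylog[i:end_bracket+1]
--
--                 if key == '[BACKSPACE]':
--                     # Supprimer le caractère avant le curseur
--                     if cursor_pos > 0:
--                         result.pop(cursor_pos - 1)
--                         cursor_pos -= 1
--
--                 elif key == '[DELETE]':
--                     # Supprimer le caractère après le curseur
--                     if cursor_pos < len(result):
--                         result.pop(cursor_pos)
--
--                 elif key == '[CAPSLOCK]':
--                     caps_lock_on = not caps_lock_on
--
--                 elif key == '[LEFT]':
--                     # Déplacer curseur vers la gauche
--                     if cursor_pos > 0:
--                         cursor_pos -= 1
--
--                 elif key == '[RIGHT]':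
--                     # Déplacer curseur vers la droite
--                     if cursor_pos < len(result):
--                         cursor_pos += 1
--
--                 elif key == '[ENTER]':
--                     # Nouvelle ligne
--                     result.insert(cursor_pos, '\n')
--                     cursor_pos += 1
--
--                 elif key == '[TAB]':
--                     # Tabulation
--                     result.insert(cursor_pos, '\t')
--                     cursor_pos += 1
--
--                 elif key in ['[SHIFT]', '[CTRL]', '[ALT]', '[WIN]']:
--                     pass
--
--                 else:
--                     result.insert(cursor_pos, key)
--                     cursor_pos += 1
--
--                 i = end_bracket + 1
--                 continue
--
--         char = raw_keylog[i]
--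
--         # Appliquer Caps Lock si activé (pour lettres minuscules)
--         if caps_lock_on and char.isalpha():
--             char = char.upper() if char.islower() else char.lower()
--
--         result.insert(cursor_pos, char)
--         cursor_pos += 1
--         i += 1
--
--     return ''.join(result)
-- ===== SOURCE B (Python) =====
-- def clean_keylog(raw_keylog: str) -> str:
--     """Gap-buffer reconstruction: two stacks (text before the cursor, text
--     after the cursor, top = nearest to cursor); every edit is O(1)."""
--     before = []          # entries left of the cursor, in text order
--     after = []           # entries right of the cursor, reversed (top at end)
--     caps_lock_on = False
--     i = 0
--     n = len(raw_keylog)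
--     while i < n:
--         c = raw_keylog[i]
--         if c == '[':
--             end_bracket = raw_keylog.find(']', i)
--             if end_bracket != -1:
--                 key = raw_keylog[i:end_bracket + 1]
--                 if key == '[BACKSPACE]':
--                     if before:
--                         before.pop()
--                 elif key == '[DELETE]':
--                     if after:
--                         after.pop()
--                 elif key == '[CAPSLOCK]':
--                     caps_lock_on = not caps_lock_on
--                 elif key == '[LEFT]':
--                     if before:
--                         after.append(before.pop())
--                 elif key == '[RIGHT]':
--                     if after:
--                         before.append(after.pop())
--                 elif key == '[ENTER]':
--                     before.append('\n')
--                 elif key == '[TAB]':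
--                     before.append('\t')
--                 elif key in ['[SHIFT]', '[CTRL]', '[ALT]', '[WIN]']:
--                     pass
--                 else:
--                     before.append(key)
--                 i = end_bracket + 1
--                 continue
--         if caps_lock_on and c.isalpha():
--             c = c.upper() if c.islower() else c.lower()
--         before.append(c)
--         i += 1
--     return ''.join(before) + ''.join(reversed(after))
-- ===== Notes on version B (the rewrite author's own statement) =====
-- stated objective: faster
-- what changed: Replaces A's single result list with positional insert/pop at the cursor (O(n) per keystroke) by a gap buffer: two stacks holding the text before and after the cursor, so every edit and cursor move is O(1) amortized.
import Mathlib
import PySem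

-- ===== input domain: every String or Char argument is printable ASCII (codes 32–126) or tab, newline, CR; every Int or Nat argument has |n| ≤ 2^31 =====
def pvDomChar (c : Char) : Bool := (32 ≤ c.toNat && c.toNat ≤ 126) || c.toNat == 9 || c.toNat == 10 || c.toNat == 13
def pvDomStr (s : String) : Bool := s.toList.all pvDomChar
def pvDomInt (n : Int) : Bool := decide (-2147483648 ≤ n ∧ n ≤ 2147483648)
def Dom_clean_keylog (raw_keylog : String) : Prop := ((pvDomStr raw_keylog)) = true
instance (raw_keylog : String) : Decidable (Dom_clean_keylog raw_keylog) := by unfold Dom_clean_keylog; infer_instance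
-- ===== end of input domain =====

-- B replaces A's single buffer with positional insert/pop at the cursor by a gap buffer
-- (two stacks around the cursor, O(1) amortized per keystroke); objective: faster.

-- ===== PORT A =====
-- Loop over the remaining suffix of the string; `result` is a list of inserted strings,
-- `cur` the cursor position (Python's cursor is always in [0, result.length], so
-- List.insertIdx / List.eraseIdx under the guards are exact ports of insert/pop).
-- `raw.find(']', i)` is ported as findIdx? on the suffix (same index, relative to i).
def cleanLoopA (cs : List Char) (res : List String) (cur : Nat) (caps : Bool) : List String :=
  match cs with
  | [] => res
  | c :: rest =>
    match (if c = '[' then (c :: rest).findIdx? (· == ']') else none) with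
    | some j =>
      let key := String.ofList ((c :: rest).take (j+1))
      let tl := (c :: rest).drop (j+1)
      if key = "[BACKSPACE]" then
        if 0 < cur then cleanLoopA tl (res.eraseIdx (cur-1)) (cur-1) caps
        else cleanLoopA tl res cur caps
      else if key = "[DELETE]" then
        if cur < res.length then cleanLoopA tl (res.eraseIdx cur) cur caps
        else cleanLoopA tl res cur caps
      else if key = "[CAPSLOCK]" then cleanLoopA tl res cur (!caps)
      else if key = "[LEFT]" then
        if 0 < cur then cleanLoopA tl res (cur-1) caps else cleanLoopA tl res cur caps
      else if key = "[RIGHT]" then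
        if cur < res.length then cleanLoopA tl res (cur+1) caps else cleanLoopA tl res cur caps
      else if key = "[ENTER]" then cleanLoopA tl (res.insertIdx cur "\n") (cur+1) caps
      else if key = "[TAB]" then cleanLoopA tl (res.insertIdx cur "\t") (cur+1) caps
      else if key = "[SHIFT]" ∨ key = "[CTRL]" ∨ key = "[ALT]" ∨ key = "[WIN]" then
        cleanLoopA tl res cur caps
      else cleanLoopA tl (res.insertIdx cur key) (cur+1) caps
    | none =>
      -- caps-lock case swap (exact on the ASCII domain, via PySem char primitives)
      let ch := if caps && PySem.Chars.isalpha c then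
                  (if PySem.Chars.islower c then PySem.Chars.upperChar c else PySem.Chars.lowerChar c)
                else c
      cleanLoopA rest (res.insertIdx cur (String.ofList [ch])) (cur+1) caps
termination_by cs.length
decreasing_by all_goals (simp [List.length_drop]; try omega)

def clean_keylog (raw_keylog : String) : String :=
  String.join (cleanLoopA raw_keylog.toList [] 0 false)

-- ===== PORT B =====
-- Gap buffer: `before` holds the entries left of the cursor (head = nearest to cursor),
-- `after` the entries right of it (head = nearest). `.tail` ports `if stk: stk.pop()`.
def cleanLoopB (cs : List Char) (before after : List String) (caps : Bool) : String :=
  match cs with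
  | [] => String.join before.reverse ++ String.join after
  | c :: rest =>
    match (if c = '[' then (c :: rest).findIdx? (· == ']') else none) with
    | some j =>
      let key := String.ofList ((c :: rest).take (j+1))
      let tl := (c :: rest).drop (j+1)
      if key = "[BACKSPACE]" then cleanLoopB tl before.tail after caps
      else if key = "[DELETE]" then cleanLoopB tl before after.tail caps
      else if key = "[CAPSLOCK]" then cleanLoopB tl before after (!caps)
      else if key = "[LEFT]" then
        match before with
        | [] => cleanLoopB tl [] after caps
        | x :: bs => cleanLoopB tl bs (x :: after) caps
      else if key = "[RIGHT]" then
        match after with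
        | [] => cleanLoopB tl before [] caps
        | y :: ys => cleanLoopB tl (y :: before) ys caps
      else if key = "[ENTER]" then cleanLoopB tl ("\n" :: before) after caps
      else if key = "[TAB]" then cleanLoopB tl ("\t" :: before) after caps
      else if key = "[SHIFT]" ∨ key = "[CTRL]" ∨ key = "[ALT]" ∨ key = "[WIN]" then
        cleanLoopB tl before after caps
      else cleanLoopB tl (key :: before) after caps
    | none =>
      let ch := if caps && PySem.Chars.isalpha c then
                  (if PySem.Chars.islower c then PySem.Chars.upperChar c else PySem.Chars.lowerChar c)
                else c
      cleanLoopB rest (String.ofList [ch] :: before) after caps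
termination_by cs.length
decreasing_by all_goals (simp [List.length_drop]; try omega)

def clean_keylog_alt (raw_keylog : String) : String :=
  cleanLoopB raw_keylog.toList [] [] false

-- ===== PRECONDITION & SPEC =====
def Spec_clean_keylog (raw_keylog : String) (out : String) : Prop := out = clean_keylog_alt raw_keylog
instance (raw_keylog : String) (out : String) : Decidable (Spec_clean_keylog raw_keylog out) := by unfold Spec_clean_keylog; infer_instance

-- ===== CLAIM (what is proved, stated in full; the proofs are below) =====
def Claim_equal_clean_keylog : Prop := ∀ (raw_keylog : String), Dom_clean_keylog raw_keylog → Spec_clean_keylog raw_keylog (clean_keylog raw_keylog)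

-- ===== LEMMAS AND PROOFS =====

lemma strfoldl (l : List String) : ∀ (init : String),
    l.foldl (· ++ ·) init = init ++ l.foldl (· ++ ·) "" := by
  induction l with
  | nil => simp
  | cons s l ih =>
    intro init
    rw [List.foldl_cons, ih, List.foldl_cons, ih ("" ++ s)]
    simp [String.append_assoc]

lemma join_append (l₁ l₂ : List String) :
    String.join (l₁ ++ l₂) = String.join l₁ ++ String.join l₂ := by
  unfold String.join
  rw [List.foldl_append, strfoldl l₂]

lemma eraseIdx_at_len {α : Type} (l : List α) (x : α) (t : List α) :
    (l ++ x :: t).eraseIdx l.length = l ++ t := by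
  induction l with
  | nil => rfl
  | cons a l ih => simp [ih]

lemma insertIdx_at_len {α : Type} (l : List α) (x : α) (t : List α) :
    (l ++ t).insertIdx l.length x = l ++ x :: t := by
  induction l with
  | nil => rfl
  | cons a l ih => simp [List.insertIdx_succ_cons, ih]

-- the buffer operations, phrased on the glued buffer b.reverse ++ a
lemma insertIdx_rev (b : List String) (x : String) (t : List String) :
    (b.reverse ++ t).insertIdx b.length x = b.reverse ++ x :: t := by
  have h := insertIdx_at_len b.reverse x t
  simpa using h

lemma eraseIdx_rev_after (b : List String) (y : String) (ys : List String) :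
    (b.reverse ++ y :: ys).eraseIdx b.length = b.reverse ++ ys := by
  have h := eraseIdx_at_len b.reverse y ys
  simpa using h

-- invariant: A's buffer is B's two stacks glued at the cursor, A's cursor = B's before-stack depth
lemma loop_eq (n : Nat) : ∀ (cs : List Char), cs.length ≤ n → ∀ (b a : List String) (caps : Bool),
    String.join (cleanLoopA cs (b.reverse ++ a) b.length caps) = cleanLoopB cs b a caps := by
  induction n with
  | zero =>
    intro cs hcs b a caps
    have h0 : cs = [] := List.length_eq_zero_iff.mp (Nat.le_zero.mp hcs)
    subst h0
    simp [cleanLoopA, cleanLoopB, join_append]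
  | succ n ih =>
    intro cs hcs b a caps
    match cs with
    | [] => simp [cleanLoopA, cleanLoopB, join_append]
    | c :: rest =>
      rw [cleanLoopA, cleanLoopB]
      cases hfind : (if c = '[' then (c :: rest).findIdx? (· == ']') else none) with
      | none =>
        have h := ih rest (by simp at hcs; omega)
          (String.ofList [if caps && PySem.Chars.isalpha c then
              (if PySem.Chars.islower c then PySem.Chars.upperChar c else PySem.Chars.lowerChar c)
            else c] :: b) a caps
        simpa [insertIdx_rev] using h
      | some j =>
        have htl : ((c :: rest).drop (j+1)).length ≤ n := by
          simp at hcs ⊢; omega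
        simp only []
        split_ifs with hk1 hg1 hk2 hg2 hk3 hk4 hg4 hk5 hg5 hk6 hk7 hk8
        · -- BACKSPACE, cursor > 0
          cases b with
          | nil => simp at hg1
          | cons x bs => simpa [eraseIdx_rev_after] using ih _ htl bs a caps
        · -- BACKSPACE, cursor = 0
          have hb : b = [] := by cases b with | nil => rfl | cons x bs => simp at hg1
          subst hb
          simpa using ih _ htl [] a caps
        · -- DELETE, cursor < len
          cases a with
          | nil => simp at hg2
          | cons y ys => simpa [eraseIdx_rev_after] using ih _ htl b ys caps
        · -- DELETE, cursor = len
          have ha : a = [] := by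
            cases a with
            | nil => rfl
            | cons y ys => exfalso; apply hg2; simp
          subst ha
          simpa using ih _ htl b [] caps
        · -- CAPSLOCK
          exact ih _ htl b a (!caps)
        · -- LEFT, cursor > 0
          cases b with
          | nil => simp at hg4
          | cons x bs => simpa using ih _ htl bs (x :: a) caps
        · -- LEFT, cursor = 0
          have hb : b = [] := by cases b with | nil => rfl | cons x bs => simp at hg4
          subst hb
          simpa using ih _ htl [] a caps
        · -- RIGHT, cursor < len
          cases a with
          | nil => simp at hg5
          | cons y ys => simpa using ih _ htl (y :: b) ys caps
        · -- RIGHT, cursor = len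
          have ha : a = [] := by
            cases a with
            | nil => rfl
            | cons y ys => exfalso; apply hg5; simp
          subst ha
          simpa using ih _ htl b [] caps
        · -- ENTER
          simpa [insertIdx_rev] using ih _ htl ("\n" :: b) a caps
        · -- TAB
          simpa [insertIdx_rev] using ih _ htl ("\t" :: b) a caps
        · -- SHIFT/CTRL/ALT/WIN
          exact ih _ htl b a caps
        · -- other bracketed key
          simpa [insertIdx_rev] using ih _ htl (String.ofList ((c :: rest).take (j+1)) :: b) a caps

-- ===== VERDICT (by name: the statement is the Claim_ definition above) =====
theorem clean_keylog_spec : Claim_equal_clean_keylog := by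
  intro raw _
  unfold Spec_clean_keylog clean_keylog clean_keylog_alt
  simpa using loop_eq raw.toList.length raw.toList le_rfl [] [] false
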